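-- pv_equiv track=rewrite | github.com/BartlomiejRegula/pp1 | kolokwium pp/p1.py | f
-- ===== SOURCE A (Python) =====
-- def f(w):
--     sum=0
--     for i in w:
--         if (i=='a' or i=='e' or i=='i' or i=='o' or i=='u' or i=='y') and i !=w[-1]:
--             sum += 2
--         elif (i=='a' or i=='e' or i=='i' or i=='o' or i=='u' or i=='y') and i ==w[-1]:
--             sum+=3
--         else:
--             sum+=1
--     return sum
-- ===== SOURCE B (Python) =====
-- VOWELS = {'a', 'e', 'i', 'o', 'u', 'y'}
--
-- def f(w):
--     if not w:
--         return 0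
--     total = len(w) + sum(c in VOWELS for c in w)
--     if w[-1] in VOWELS:
--         total += w.count(w[-1])
--     return total
-- ===== Notes on version B (the rewrite author's own statement) =====
-- stated objective: simpler
-- what changed: Replaced the per-character 3-way branch accumulation by a closed-form aggregate: length + vowel count + (occurrences of the last character, if it is a vowel).
import Mathlib
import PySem

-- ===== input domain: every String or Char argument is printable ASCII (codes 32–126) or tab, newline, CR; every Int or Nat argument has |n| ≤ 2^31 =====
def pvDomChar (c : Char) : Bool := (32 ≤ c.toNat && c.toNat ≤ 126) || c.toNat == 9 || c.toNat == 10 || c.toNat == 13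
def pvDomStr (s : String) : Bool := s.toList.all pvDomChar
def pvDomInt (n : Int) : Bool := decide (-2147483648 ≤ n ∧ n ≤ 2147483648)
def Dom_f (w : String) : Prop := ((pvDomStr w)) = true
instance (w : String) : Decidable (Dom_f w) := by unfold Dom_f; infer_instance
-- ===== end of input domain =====

-- B replaces A's per-character 3-way branch by a closed-form aggregate:
-- length + vowel count + (count of the last character, if it is a vowel).

-- ===== PORT A =====
-- the vowel test of A's two branches
def isVow (c : Char) : Bool :=
  c == 'a' || c == 'e' || c == 'i' || c == 'o' || c == 'u' || c == 'y'

-- A's loop body: w[-1] is read each iteration (never raises since the loop only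
-- runs when w is nonempty, so pyGet? returns `some` there)
def fStep (w : String) (s : Int) (i : Char) : Int :=
  if isVow i && !(some i == PySem.Str.pyGet? w (-1)) then s + 2
  else if isVow i && (some i == PySem.Str.pyGet? w (-1)) then s + 3
  else s + 1

def f (w : String) : Int :=
  w.toList.foldl (fStep w) 0

-- ===== PORT B =====
def f_alt (w : String) : Int :=
  if w.toList = [] then 0
  else
    let total : Int := (w.toList.length : Int) + (w.toList.countP isVow : Int)
    match PySem.Str.pyGet? w (-1) with
    | some c => if isVow c then total + (w.toList.count c : Int) else total
    | none => total

-- ===== PRECONDITION & SPEC =====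
def Spec_f (w : String) (out : Int) : Prop := out = f_alt w
instance (w : String) (out : Int) : Decidable (Spec_f w out) := by unfold Spec_f; infer_instance

-- ===== CLAIM (what is proved, stated in full; the proofs are below) =====
def Claim_equal_f : Prop := ∀ (w : String), Dom_f w → Spec_f w (f w)

-- ===== LEMMAS AND PROOFS =====

-- each character contributes 1 + [is vowel] + [is vowel and equals the last char]
theorem fStep_val (w : String) (s : Int) (i : Char) :
    fStep w s i = s + 1 + (if isVow i then 1 else 0)
      + (if isVow i && (some i == PySem.Str.pyGet? w (-1)) then 1 else 0) := by
  unfold fStep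
  generalize PySem.Str.pyGet? w (-1) = o
  cases hv : isVow i <;> cases he : (some i == o) <;> simp [hv, he] <;> ring

theorem foldl_fStep (w : String) (l : List Char) (s : Int) :
    l.foldl (fStep w) s = s + (l.length : Int) + (l.countP isVow : Int)
      + (l.countP (fun i => isVow i && (some i == PySem.Str.pyGet? w (-1))) : Int) := by
  induction l generalizing s with
  | nil => simp
  | cons a t ih =>
    rw [List.foldl_cons, ih, fStep_val]
    rw [List.countP_cons, List.countP_cons]
    cases hv : isVow a <;>
      cases he : (some a == PySem.Str.pyGet? w (-1)) <;>
      simp [hv, he] <;> push_cast <;> ring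

theorem countP_eq_last (l : List Char) (c : Char) :
    l.countP (fun i => isVow i && (some i == some c))
      = if isVow c then l.count c else 0 := by
  by_cases hv : isVow c
  · rw [if_pos hv, List.count]
    apply List.countP_congr
    intro x _
    simp only [Bool.and_eq_true, beq_iff_eq, Option.some_inj]
    constructor
    · exact fun h => by simpa using h.2
    · intro h
      have hx : x = c := by simpa using h
      subst hx
      exact ⟨hv, rfl⟩
  · rw [if_neg hv, List.countP_eq_zero]
    intro x _ h
    simp only [Bool.and_eq_true, beq_iff_eq, Option.some_inj] at h
    exact hv (h.2 ▸ h.1)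

-- ===== VERDICT =====
theorem f_spec : Claim_equal_f := by
  intro w _
  unfold Spec_f f f_alt
  rcases hl : w.toList with _ | ⟨a, t⟩
  · simp
  · rcases hlast : (a :: t).getLast? with _ | c
    · simp [List.getLast?_eq_none_iff] at hlast
    · have hget : PySem.Str.pyGet? w (-1) = some c := by
        simp [PySem.Str.pyGet?, hl, PySem.List.pyGet?_neg_one, hlast]
      rw [foldl_fStep, hget, countP_eq_last]
      by_cases hv : isVow c <;> simp [hv]
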